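-- pv_equiv track=rewrite | github.com/ppannuto/patpannuto.com | publications.py | invert_string
-- ===== SOURCE A (Python) =====
-- def invert_string (s):
-- 	ret = ''
-- 	for l in s:
-- 		o = ord(l)
-- 		if (o >= 65 and o <= 90) or (o >= 97 and o <= 122):
-- 			o = 187-o
-- 		ret += chr(o)
-- 	return ret
-- ===== SOURCE B (Python) =====
-- def invert_string(s):
--     # Divide and conquer: split the string in half, invert each half
--     # recursively, concatenate; a single character is mirrored directly.
--     if len(s) == 0:
--         return ''
--     if len(s) == 1:
--         o = ord(s)
--         if 65 <= o <= 90 or 97 <= o <= 122: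
--             return chr(187 - o)
--         return s
--     m = len(s) // 2
--     return invert_string(s[:m]) + invert_string(s[m:])
-- ===== Notes on version B (the rewrite author's own statement) =====
-- stated objective: alternative
-- what changed: Replaced A's left-to-right loop with an accumulator and char-by-char concatenation by a divide-and-conquer recursion that halves the string, inverts each half recursively and concatenates the results.
import Mathlib
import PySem

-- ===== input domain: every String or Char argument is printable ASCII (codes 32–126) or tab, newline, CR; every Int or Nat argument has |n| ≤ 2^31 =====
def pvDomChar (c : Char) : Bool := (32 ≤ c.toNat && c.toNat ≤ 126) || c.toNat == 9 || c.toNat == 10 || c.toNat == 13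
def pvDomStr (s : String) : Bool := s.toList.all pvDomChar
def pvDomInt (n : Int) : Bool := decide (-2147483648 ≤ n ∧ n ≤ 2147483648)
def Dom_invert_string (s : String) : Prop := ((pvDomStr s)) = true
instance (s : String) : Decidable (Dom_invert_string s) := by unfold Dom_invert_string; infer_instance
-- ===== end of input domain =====

-- B replaces A's accumulating left-to-right loop by a divide-and-conquer
-- recursion: halve the string, invert the halves, concatenate (alternative).

-- ===== PORT A =====
-- literal transliteration: ret = ''; for l in s: o = ord(l); if …: o = 187-o; ret += chr(o)
def invert_string (s : String) : String :=
  s.toList.foldl (fun ret l =>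
    let o : Int := (l.toNat : Int)
    let o' : Int := if (o ≥ 65 ∧ o ≤ 90) ∨ (o ≥ 97 ∧ o ≤ 122) then 187 - o else o
    ret ++ String.ofList [Char.ofNat o'.toNat]) ""

-- ===== PORT B =====
-- Source B's recursion on the character list; s[:m] / s[m:] with 0 ≤ m ≤ len s are
-- exactly List.take m / List.drop m.
def invert_string_alt_go : List Char → List Char
  | [] => []
  | [c] =>
    let o := c.toNat
    if (65 ≤ o ∧ o ≤ 90) ∨ (97 ≤ o ∧ o ≤ 122) then [Char.ofNat (187 - o)] else [c]
  | a :: b :: t =>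
    let l := a :: b :: t
    let m := l.length / 2
    invert_string_alt_go (l.take m) ++ invert_string_alt_go (l.drop m)
termination_by l => l.length
decreasing_by
  · simp only [List.length_take, List.length_cons]; omega
  · simp only [List.length_drop, List.length_cons]; omega

def invert_string_alt (s : String) : String :=
  String.ofList (invert_string_alt_go s.toList)

-- ===== PRECONDITION & SPEC =====
def Spec_invert_string (s : String) (out : String) : Prop := out = invert_string_alt s
instance (s : String) (out : String) : Decidable (Spec_invert_string s out) := by unfold Spec_invert_string; infer_instance

-- ===== CLAIM (what is proved, stated in full; the proofs are below) =====
def Claim_equal_invert_string : Prop := ∀ (s : String), Dom_invert_string s → Spec_invert_string s (invert_string s)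

-- ===== LEMMAS AND PROOFS =====

-- the common per-character mirror map
def pvMirror (c : Char) : Char :=
  if (65 ≤ c.toNat ∧ c.toNat ≤ 90) ∨ (97 ≤ c.toNat ∧ c.toNat ≤ 122)
  then Char.ofNat (187 - c.toNat) else c

theorem go_eq_map_aux : ∀ (n : Nat) (l : List Char), l.length ≤ n →
    invert_string_alt_go l = l.map pvMirror := by
  intro n
  induction n with
  | zero =>
    intro l h
    have hl : l = [] := List.eq_nil_of_length_eq_zero (Nat.le_zero.mp h)
    subst hl
    rw [invert_string_alt_go]
    rfl
  | succ n ih =>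
    intro l h
    match l with
    | [] => rw [invert_string_alt_go]; rfl
    | [c] =>
      rw [invert_string_alt_go]
      simp only [pvMirror, List.map]
      split <;> rfl
    | a :: b :: t =>
      rw [invert_string_alt_go]
      have hlen : (a :: b :: t).length = t.length + 2 := by simp
      have h1 : ((a :: b :: t).take ((a :: b :: t).length / 2)).length ≤ n := by
        simp only [List.length_take, hlen] at *
        omega
      have h2 : ((a :: b :: t).drop ((a :: b :: t).length / 2)).length ≤ n := by
        simp only [List.length_drop, hlen] at *
        omega
      rw [ih _ h1, ih _ h2, ← List.map_append, List.take_append_drop]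

theorem go_eq_map (l : List Char) : invert_string_alt_go l = l.map pvMirror :=
  go_eq_map_aux l.length l (Nat.le_refl _)

theorem perchar (c : Char) :
    Char.ofNat (if ((c.toNat : Int) ≥ 65 ∧ (c.toNat : Int) ≤ 90) ∨
                   ((c.toNat : Int) ≥ 97 ∧ (c.toNat : Int) ≤ 122)
                then 187 - (c.toNat : Int) else (c.toNat : Int)).toNat = pvMirror c := by
  unfold pvMirror
  by_cases h : (65 ≤ c.toNat ∧ c.toNat ≤ 90) ∨ (97 ≤ c.toNat ∧ c.toNat ≤ 122)
  · have hcond : ((c.toNat : Int) ≥ 65 ∧ (c.toNat : Int) ≤ 90) ∨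
                 ((c.toNat : Int) ≥ 97 ∧ (c.toNat : Int) ≤ 122) := by
      rcases h with ⟨h1, h2⟩ | ⟨h1, h2⟩
      · left; constructor <;> [exact_mod_cast h1; exact_mod_cast h2]
      · right; constructor <;> [exact_mod_cast h1; exact_mod_cast h2]
    rw [if_pos hcond, if_pos h]
    congr 1
    omega
  · have hcond : ¬ (((c.toNat : Int) ≥ 65 ∧ (c.toNat : Int) ≤ 90) ∨
                    ((c.toNat : Int) ≥ 97 ∧ (c.toNat : Int) ≤ 122)) := by
      intro hc
      apply h
      rcases hc with ⟨h1, h2⟩ | ⟨h1, h2⟩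
      · left; constructor <;> omega
      · right; constructor <;> omega
    rw [if_neg hcond, if_neg h]
    simp [Char.ofNat_toNat]

theorem foldl_append_mk (g : Char → Char) :
    ∀ (l : List Char) (acc : List Char),
      l.foldl (fun ret c => ret ++ String.ofList [g c]) (String.ofList acc)
        = String.ofList (acc ++ l.map g) := by
  intro l
  induction l with
  | nil => intro acc; simp
  | cons a t ih =>
    intro acc
    have hstep : String.ofList acc ++ String.ofList [g a] = String.ofList (acc ++ [g a]) :=
      (String.ofList_append).symm
    simp only [List.foldl_cons, hstep, ih, List.map_cons]
    simp

-- ===== VERDICT (by name: the statement is the Claim_ definition above) =====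
theorem invert_string_spec : Claim_equal_invert_string := by
  intro s _
  unfold Spec_invert_string invert_string invert_string_alt
  rw [go_eq_map]
  have hfun : (fun (ret : String) (l : Char) =>
      let o : Int := (l.toNat : Int)
      let o' : Int := if (o ≥ 65 ∧ o ≤ 90) ∨ (o ≥ 97 ∧ o ≤ 122) then 187 - o else o
      ret ++ String.ofList [Char.ofNat o'.toNat])
    = (fun (ret : String) (c : Char) => ret ++ String.ofList [pvMirror c]) := by
    funext ret c
    simp only [perchar]
  rw [hfun]
  simpa using foldl_append_mk pvMirror s.toList []
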